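-- pv_equiv track=rewrite | github.com/MFry/pyAlgoDataStructures | Top Coder/Greedy/SRM222_GroceryBag.py | minimumBags
-- ===== SOURCE A (Python) =====
-- def minimumBags(strength, items):
--     item_count = {}
--     for item in items:
--         if item in item_count:
--             item_count[item] += 1
--         else:
--             item_count[item] = 1
--     total_bags = 0
--     for item in item_count.items():
--         item_total = item[1]
--         while item_total > 0:
--             item_total -= strength
--             total_bags += 1
--     return total_bags
-- ===== SOURCE B (Python) =====
-- def minimumBags(strength, items):
--     counts = {}
--     for item in items:
--         counts[item] = counts.get(item, 0) + 1
--     return sum(-(-c // strength) for c in counts.values())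
-- ===== Notes on version B (the rewrite author's own statement) =====
-- stated objective: alternative
-- what changed: Replaces A's inner while-loop of repeated subtraction per distinct item by a closed-form ceiling division -(-count//strength), summed over the counts.
import Mathlib
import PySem

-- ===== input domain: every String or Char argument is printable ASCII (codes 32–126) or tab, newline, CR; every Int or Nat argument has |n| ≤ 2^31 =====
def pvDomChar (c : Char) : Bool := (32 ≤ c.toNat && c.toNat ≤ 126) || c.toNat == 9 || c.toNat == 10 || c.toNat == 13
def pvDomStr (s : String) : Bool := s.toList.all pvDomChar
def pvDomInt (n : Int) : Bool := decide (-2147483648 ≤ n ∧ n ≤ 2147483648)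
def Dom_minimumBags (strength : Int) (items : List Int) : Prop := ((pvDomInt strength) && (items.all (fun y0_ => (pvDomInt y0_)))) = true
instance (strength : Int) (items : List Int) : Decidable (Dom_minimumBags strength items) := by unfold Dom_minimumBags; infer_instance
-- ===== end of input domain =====

-- B replaces A's inner while-loop of repeated subtraction by a closed-form ceiling division per count (alternative).
-- ===== PORT A =====
-- inner while loop: 'while item_total > 0: item_total -= strength; total_bags += 1'
-- (the '0 < strength' guard only makes the recursion total; Python diverges when strength ≤ 0, excluded by Pre_)
def pvBagLoop (strength : Int) (t : Int) (acc : Int) : Int :=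
  if h : 0 < t ∧ 0 < strength then pvBagLoop strength (t - strength) (acc + 1) else acc
termination_by t.toNat
decreasing_by omega

def minimumBags (strength : Int) (items : List Int) : Int :=
  let item_count : PySem.Dict Int Int :=
    items.foldl (fun d item =>
      if d.contains item then d.modify item 0 (· + 1) else d.insert item 1) PySem.Dict.empty
  item_count.items.foldl (fun total_bags item => pvBagLoop strength item.2 total_bags) 0

-- ===== PORT B =====
def minimumBags_alt (strength : Int) (items : List Int) : Int :=
  let counts : PySem.Dict Int Int :=
    items.foldl (fun d item => d.insert item (d.getD item 0 + 1)) PySem.Dict.empty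
  (counts.values.map (fun c => -(PySem.Int.floordiv (-c) strength))).sum

-- ===== PRECONDITION & SPEC =====
-- Pre_ excludes exactly the inputs where A's while loop never terminates (strength ≤ 0 with at
-- least one item): A returns no value there (it diverges), so nothing A returns on is excluded.
def Pre_minimumBags (strength : Int) (items : List Int) : Prop := 0 < strength ∨ items = []
instance (strength : Int) (items : List Int) : Decidable (Pre_minimumBags strength items) := by unfold Pre_minimumBags; infer_instance
def pvWitness_minimumBags : Int × List Int := (3, [1, 1, 1, 1, 2])

def Spec_minimumBags (strength : Int) (items : List Int) (out : Int) : Prop := out = minimumBags_alt strength items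
instance (strength : Int) (items : List Int) (out : Int) : Decidable (Spec_minimumBags strength items out) := by unfold Spec_minimumBags; infer_instance

-- ===== CLAIM (what is proved, stated in full; the proofs are below) =====
def Claim_equal_minimumBags : Prop := ∀ (strength : Int) (items : List Int), Dom_minimumBags strength items → Pre_minimumBags strength items → Spec_minimumBags strength items (minimumBags strength items)

-- ===== LEMMAS AND PROOFS =====

-- A's counting loop (if-in-dict then += else = 1) builds Counter(items)
lemma pvCountA_eq_counter (items : List Int) :
    items.foldl (fun d item =>
      if d.contains item then d.modify item 0 (· + 1) else d.insert item 1) PySem.Dict.empty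
    = PySem.Dict.counter items := by
  rw [PySem.Dict.counter_eq_foldl]
  have hstep : (fun (d : PySem.Dict Int Int) item =>
      if d.contains item then d.modify item 0 (· + 1) else d.insert item 1)
      = fun d x => d.modify x 0 (· + 1) := by
    funext d x
    split
    · rfl
    · rename_i h
      have hf : d.contains x = false := by simpa using h
      simp [PySem.Dict.insert, PySem.Dict.modify, hf, PySem.Dict.getD_of_not_contains d 0 hf]
  rw [hstep]

-- A's inner while loop is ceiling division
lemma pvBagLoop_eq_ceil (strength t acc : Int) (hs : 0 < strength) :
    pvBagLoop strength t acc = acc + (if 0 < t then -(PySem.Int.floordiv (-t) strength) else 0) := by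
  fun_induction pvBagLoop strength t acc with
  | case1 t acc h ih =>
    rw [ih]
    have ht : 0 < t := h.1
    by_cases h2 : 0 < t - strength
    · simp only [if_pos h2, if_pos ht]
      set q : Int := -(PySem.Int.floordiv (-(t - strength)) strength) with hq
      have hb := (PySem.Int.neg_floordiv_neg_eq_iff_of_pos hs).mp hq.symm
      have hc : -(PySem.Int.floordiv (-t) strength) = q + 1 :=
        (PySem.Int.neg_floordiv_neg_eq_iff_of_pos hs).mpr ⟨by nlinarith [hb.1], by nlinarith [hb.2]⟩
      rw [hc]; ring
    · simp only [if_neg h2, if_pos ht]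
      have hc : -(PySem.Int.floordiv (-t) strength) = 1 :=
        (PySem.Int.neg_floordiv_neg_eq_iff_of_pos hs).mpr ⟨by nlinarith, by nlinarith⟩
      rw [hc]; ring
  | case2 t acc h =>
    have ht : ¬ 0 < t := by tauto
    simp [ht]

-- ===== VERDICT =====
theorem minimumBags_spec : Claim_equal_minimumBags := by
  intro strength items _ hpre
  unfold Spec_minimumBags minimumBags minimumBags_alt
  rcases hpre with hs | hnil
  · rw [pvCountA_eq_counter, PySem.Dict.foldl_insert_getD_add_one_eq_counter]
    simp only [pvBagLoop_eq_ceil _ _ _ hs, PySem.List.foldl_add, zero_add]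
    simp only [PySem.Dict.values, PySem.Dict.items_counter, List.map_map]
    apply congrArg List.sum
    apply List.map_congr_left
    intro k hk
    have hkmem : k ∈ items := (PySem.Set.mem_ofList items k).mp hk
    have hc : 0 < (items.count k : Int) := by
      exact_mod_cast List.count_pos_iff.mpr hkmem
    show (if 0 < ((items.count k : Int)) then -(PySem.Int.floordiv (-(items.count k : Int)) strength) else 0) = -(PySem.Int.floordiv (-(items.count k : Int)) strength)
    rw [if_pos hc]
  · subst hnil; rfl
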